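-- pv_equiv track=rewrite | github.com/jonmcoe/aoc2017 | shared.py | remove_garbage
-- ===== SOURCE A (Python) =====
-- def remove_garbage(raw_string):
--     # handle !
--     no_exclamations_string = ""
--     last_exclamation = False
--     for i in raw_string:
--         if not last_exclamation and i != '!':
--             no_exclamations_string += i
--         last_exclamation = i == '!' and not last_exclamation
--
--     # remove < > blocks
--     discarded_interior = 0
--     garbageless_string = ""
--     active_left_anglebracket = False
--     for i in no_exclamations_string:
--         if active_left_anglebracket and i != '>':
--             discarded_interior += 1
--         if i == '<':
--             active_left_anglebracket = True
--
--         if not active_left_anglebracket: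
--             garbageless_string += i
--         else:
--             active_left_anglebracket = i != '>'
--     return garbageless_string, discarded_interior
-- ===== SOURCE B (Python) =====
-- def remove_garbage(raw_string):
--     # Single pass: escape and garbage state machines fused into one loop.
--     out = []
--     discarded = 0
--     escape = False
--     in_garbage = False
--     for c in raw_string:
--         if escape:
--             escape = False
--         elif c == '!':
--             escape = True
--         elif in_garbage:
--             if c == '>':
--                 in_garbage = False
--             else:
--                 discarded += 1
--         elif c == '<':
--             in_garbage = True
--         else:
--             out.append(c)
--     return ''.join(out), discarded
-- ===== Notes on version B (the rewrite author's own statement) =====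
-- stated objective: faster
-- what changed: A's two sequential passes (first strip '!'-escapes into an intermediate string via repeated +=, then remove <...> garbage with another += loop) are fused into one single-pass state machine (escape/in_garbage flags) that appends kept chars to a list and joins once.
import Mathlib
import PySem

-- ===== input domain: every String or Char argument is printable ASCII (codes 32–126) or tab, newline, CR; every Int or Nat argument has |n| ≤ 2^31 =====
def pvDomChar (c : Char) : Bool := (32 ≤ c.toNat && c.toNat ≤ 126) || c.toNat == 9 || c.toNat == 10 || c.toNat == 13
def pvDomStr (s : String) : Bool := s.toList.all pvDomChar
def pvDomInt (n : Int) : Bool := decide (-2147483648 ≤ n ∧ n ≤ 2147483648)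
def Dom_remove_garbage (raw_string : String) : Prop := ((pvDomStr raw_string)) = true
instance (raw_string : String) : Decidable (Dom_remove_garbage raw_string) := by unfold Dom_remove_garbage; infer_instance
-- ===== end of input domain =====

-- B fuses A's two passes into one single-pass state machine with no intermediate string (measured constant-factor speedup).
-- ===== PORT A =====
-- pass 1 step: drop '!' and the escaped character
def stepA1 (st : List Char × Bool) (i : Char) : List Char × Bool :=
  (if !st.2 && i != '!' then st.1 ++ [i] else st.1, i == '!' && !st.2)

-- pass 2 step: remove <...> blocks, counting discarded interior characters
def stepA2 (st : Bool × List Char × Int) (i : Char) : Bool × List Char × Int :=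
  let d : Int := if st.1 && i != '>' then st.2.2 + 1 else st.2.2
  let a : Bool := st.1 || i == '<'
  if !a then (a, st.2.1 ++ [i], d) else (i != '>', st.2.1, d)

def remove_garbage (raw_string : String) : String × Int :=
  let r1 := raw_string.toList.foldl stepA1 ([], false)
  let r2 := r1.1.foldl stepA2 (false, [], 0)
  (String.mk r2.2.1, r2.2.2)

-- ===== PORT B =====
-- single-pass step over state (escape, in_garbage, out, discarded)
def stepB (st : Bool × Bool × List Char × Int) (c : Char) : Bool × Bool × List Char × Int :=
  if st.1 then (false, st.2.1, st.2.2.1, st.2.2.2)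
  else if c == '!' then (true, st.2.1, st.2.2.1, st.2.2.2)
  else if st.2.1 then
    (if c == '>' then (false, false, st.2.2.1, st.2.2.2)
     else (false, true, st.2.2.1, st.2.2.2 + 1))
  else if c == '<' then (false, true, st.2.2.1, st.2.2.2)
  else (false, false, st.2.2.1 ++ [c], st.2.2.2)

def remove_garbage_alt (raw_string : String) : String × Int :=
  let r := raw_string.toList.foldl stepB (false, false, [], 0)
  (String.mk r.2.2.1, r.2.2.2)

-- ===== PRECONDITION & SPEC =====
def Spec_remove_garbage (raw_string : String) (out : String × Int) : Prop := out = remove_garbage_alt raw_string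
instance (raw_string : String) (out : String × Int) : Decidable (Spec_remove_garbage raw_string out) := by unfold Spec_remove_garbage; infer_instance

-- ===== CLAIM (what is proved, stated in full; the proofs are below) =====
def Claim_equal_remove_garbage : Prop := ∀ (raw_string : String), Dom_remove_garbage raw_string → Spec_remove_garbage raw_string (remove_garbage raw_string)

-- ===== LEMMAS AND PROOFS =====

-- recursive characterisation of A's first pass (kept characters, final escape flag)
def p1 : List Char → Bool → List Char × Bool
  | [], e => ([], e)
  | c :: cs, e =>
    let r := p1 cs ((c == '!') && !e)
    (if !e && c != '!' then c :: r.1 else r.1, r.2)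

theorem foldlA1_eq : ∀ (cs : List Char) (acc : List Char) (e : Bool),
    List.foldl stepA1 (acc, e) cs = (acc ++ (p1 cs e).1, (p1 cs e).2) := by
  intro cs
  induction cs with
  | nil => intro acc e; simp [p1]
  | cons c cs ih =>
    intro acc e
    simp only [List.foldl_cons, stepA1, p1]
    by_cases h : (!e && c != '!') = true <;> simp [h, ih]

theorem stepB_eq_stepA2 (g : Bool) (out : List Char) (d : Int) (c : Char) (hc : (c == '!') = false) :
    stepB (false, g, out, d) c = (false, stepA2 (g, out, d) c) := by
  simp only [stepB, stepA2, hc]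
  by_cases hg : g <;> by_cases h1 : (c == '>') = true <;> by_cases h2 : (c == '<') = true <;>
    simp_all <;> simp_all [show c ≠ '>' from fun h => by simp [h] at h1]

theorem fuse : ∀ (cs : List Char) (e g : Bool) (out : List Char) (d : Int),
    List.foldl stepB (e, g, out, d) cs
      = ((p1 cs e).2, List.foldl stepA2 (g, out, d) (p1 cs e).1) := by
  intro cs
  induction cs with
  | nil => intro e g out d; simp [p1]
  | cons c cs ih =>
    intro e g out d
    by_cases he : e
    · subst he
      have : stepB (true, g, out, d) c = (false, g, out, d) := by simp [stepB]
      simp [this, p1, ih]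
    · simp only [Bool.not_eq_true] at he; subst he
      by_cases hc : (c == '!') = true
      · have hcc : c = '!' := by simpa using hc
        subst hcc
        have : stepB (false, g, out, d) '!' = (true, g, out, d) := by simp [stepB]
        simp [this, p1, ih]
      · simp only [Bool.not_eq_true] at hc
        have hcc : c ≠ '!' := by simpa using hc
        simp only [List.foldl_cons, stepB_eq_stepA2 g out d c hc, p1, hc]
        simp [ih, hcc]

-- ===== VERDICT (by name: the statement is the Claim_ definition above) =====
theorem remove_garbage_spec : Claim_equal_remove_garbage := by
  intro s _
  unfold Spec_remove_garbage remove_garbage remove_garbage_alt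
  rw [fuse, foldlA1_eq]
  simp
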